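-- pv_equiv track=rewrite | github.com/Boostcamp-Algorithm-Study/Boostcamp-Algorithm-Study | Week/Week02/프렌즈4블록_김주성.py | remove_blocks
-- ===== SOURCE A (Python) =====
-- def remove_blocks(board, m, n):
--     check = [[False for c in range(n)] for r in range(m)]
--     for r in range(m-1):
--         for c in range(n-1):
--             block = board[r][c]
--             if block == '':
--                 continue
--             if board[r+1][c] == block and board[r][c+1] == block and board[r+1][c+1] == block:
--                 check[r][c] = True
--                 check[r+1][c] = True
--                 check[r][c+1] = True
--                 check[r+1][c+1] = True
--
--     cnt_removed = 0
--     for r in range(m):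
--         for c in range(n):
--              if check[r][c]:
--                 board[r][c] = ''
--                 cnt_removed += 1
--     return cnt_removed
-- ===== SOURCE B (Python) =====
-- def remove_blocks(board, m, n):
--     def matches(r, c):
--         v = board[r][c]
--         return v != '' and board[r + 1][c] == v and board[r][c + 1] == v and board[r + 1][c + 1] == v
--
--     def covered(r, c):
--         for rr in (r - 1, r):
--             for cc in (c - 1, c):
--                 if 0 <= rr < m - 1 and 0 <= cc < n - 1 and matches(rr, cc):
--                     return True
--         return False
--
--     cleared = [(r, c) for r in range(m) for c in range(n) if covered(r, c)]
--     for r, c in cleared: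
--         board[r][c] = ''
--     return len(cleared)
-- ===== Notes on version B (the rewrite author's own statement) =====
-- stated objective: alternative
-- what changed: B removes the boolean mark grid and the staged mark-then-rescan structure: it tests each cell directly against the up-to-four 2x2 windows that contain it (cell-centric instead of window-centric), collects the covered cells, blanks them and returns their number.
-- outside the precondition, e.g. on remove_blocks([['', 'a'], ['b']], 2, 2): A returns 0, B returns 0
import Mathlib
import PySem

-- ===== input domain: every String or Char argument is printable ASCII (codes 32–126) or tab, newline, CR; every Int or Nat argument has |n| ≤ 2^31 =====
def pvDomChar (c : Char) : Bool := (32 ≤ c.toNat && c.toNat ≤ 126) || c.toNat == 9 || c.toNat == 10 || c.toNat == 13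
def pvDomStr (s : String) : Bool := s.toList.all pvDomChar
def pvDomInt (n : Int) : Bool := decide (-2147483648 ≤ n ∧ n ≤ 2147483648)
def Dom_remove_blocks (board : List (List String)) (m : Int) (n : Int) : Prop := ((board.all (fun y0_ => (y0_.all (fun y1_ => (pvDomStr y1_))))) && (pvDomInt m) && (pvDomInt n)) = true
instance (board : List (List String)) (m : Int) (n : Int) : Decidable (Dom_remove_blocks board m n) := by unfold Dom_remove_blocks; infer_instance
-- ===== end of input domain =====

-- B drops A's boolean mark grid and the mark-then-rescan staging: it tests each cell
-- directly against the up-to-four 2x2 windows containing it, collects the covered cells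
-- and returns their number. Return-value equivalence only: both Pythons also blank the
-- matched cells of `board` in place (they blank the same cells).

-- ===== PORT A =====

-- check[r][c] = True  (Python list assignment, in-range under Pre_)
def pvMark (check : List (List Bool)) (r c : Int) : List (List Bool) :=
  PySem.List.pySetD check r (PySem.List.pySetD (PySem.List.pyGetD check r []) c true)

def remove_blocks (board : List (List String)) (m : Int) (n : Int) : Int :=
  let check0 : List (List Bool) :=
    (PySem.List.pyRange 0 m 1).map (fun _ => (PySem.List.pyRange 0 n 1).map (fun _ => false))
  let check :=
    (PySem.List.pyRange 0 (m-1) 1).foldl (fun check r =>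
      (PySem.List.pyRange 0 (n-1) 1).foldl (fun check c =>
        let block := PySem.List.pyGetD (PySem.List.pyGetD board r []) c ""
        if block = "" then check
        else if PySem.List.pyGetD (PySem.List.pyGetD board (r+1) []) c "" = block
                ∧ PySem.List.pyGetD (PySem.List.pyGetD board r []) (c+1) "" = block
                ∧ PySem.List.pyGetD (PySem.List.pyGetD board (r+1) []) (c+1) "" = block then
          pvMark (pvMark (pvMark (pvMark check r c) (r+1) c) r (c+1)) (r+1) (c+1)
        else check) check) check0
  (PySem.List.pyRange 0 m 1).foldl (fun cnt r =>
    (PySem.List.pyRange 0 n 1).foldl (fun cnt c =>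
      if PySem.List.pyGetD (PySem.List.pyGetD check r []) c false then cnt + 1 else cnt) cnt) 0

-- ===== PORT B =====

-- Source B's `matches(r, c)`: does the 2x2 window whose top-left corner is (r, c) match?
def pvAltMatches (board : List (List String)) (r c : Int) : Bool :=
  let v := PySem.List.pyGetD (PySem.List.pyGetD board r []) c ""
  decide (v ≠ ""
    ∧ PySem.List.pyGetD (PySem.List.pyGetD board (r+1) []) c "" = v
    ∧ PySem.List.pyGetD (PySem.List.pyGetD board r []) (c+1) "" = v
    ∧ PySem.List.pyGetD (PySem.List.pyGetD board (r+1) []) (c+1) "" = v)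

-- Source B's `covered(r, c)`: some in-range window among the four containing (r, c) matches
def pvAltCovered (board : List (List String)) (m n r c : Int) : Bool :=
  [r - 1, r].any (fun rr => [c - 1, c].any (fun cc =>
    decide (0 ≤ rr ∧ rr < m - 1 ∧ 0 ≤ cc ∧ cc < n - 1) && pvAltMatches board rr cc))

def remove_blocks_alt (board : List (List String)) (m : Int) (n : Int) : Int :=
  let cleared : List (Int × Int) :=
    (PySem.List.pyRange 0 m 1).flatMap (fun r =>
      ((PySem.List.pyRange 0 n 1).filter (fun c => pvAltCovered board m n r c)).map
        (fun c => (r, c)))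
  (cleared.length : Int)

-- ===== PRECONDITION & SPEC =====
-- When m ≤ 1 or n ≤ 1 the Python A never touches the board and returns 0; otherwise Pre_ asks
-- for a well-formed board (at least m rows, the first m rows with at least n cells). It excludes
-- ragged/short boards on which the Python A raises IndexError, and with them the data-dependent
-- corners where A avoids the IndexError only because a '' cell short-circuits the neighbour
-- reads (see the cite in the claim; both programs agree there anyway).
def Pre_remove_blocks (board : List (List String)) (m : Int) (n : Int) : Prop :=
  m ≤ 1 ∨ n ≤ 1 ∨ (m.toNat ≤ board.length ∧ ∀ row ∈ board.take m.toNat, n.toNat ≤ row.length)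
instance (board : List (List String)) (m : Int) (n : Int) : Decidable (Pre_remove_blocks board m n) := by unfold Pre_remove_blocks; infer_instance

def pvWitness_remove_blocks : List (List String) × Int × Int := ([["a", "a"], ["a", "a"]], 2, 2)

def Spec_remove_blocks (board : List (List String)) (m : Int) (n : Int) (out : Int) : Prop := out = remove_blocks_alt board m n
instance (board : List (List String)) (m : Int) (n : Int) (out : Int) : Decidable (Spec_remove_blocks board m n out) := by unfold Spec_remove_blocks; infer_instance

-- ===== CLAIM (what is proved, stated in full; the proofs are below) =====
def Claim_equal_remove_blocks : Prop := ∀ (board : List (List String)) (m : Int) (n : Int), Dom_remove_blocks board m n → Pre_remove_blocks board m n → Spec_remove_blocks board m n (remove_blocks board m n)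

-- ===== LEMMAS AND PROOFS =====

-- generic loop-shape lemmas

theorem pv_foldl_nest {α β γ : Type} (l1 : List α) (l2 : List β) (g : γ → α → β → γ) (init : γ) :
    l1.foldl (fun s r => l2.foldl (fun s c => g s r c) s) init
      = (l1.flatMap (fun r => l2.map (fun c => (r, c)))).foldl (fun s p => g s p.1 p.2) init := by
  induction l1 generalizing init with
  | nil => rfl
  | cons a t ih => simp [List.foldl_append, List.foldl_map, ih]

theorem pv_foldl_if_filter {α γ : Type} (p : α → Bool) (f : γ → α → γ) (l : List α) (init : γ) :
    l.foldl (fun s x => if p x then f s x else s) init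
      = (l.filter p).foldl f init := by
  induction l generalizing init with
  | nil => rfl
  | cons a t ih => by_cases h : p a <;> simp [h, ih]

theorem pv_foldl_len {α : Type} (l : List α) (i : Int) :
    l.foldl (fun c _ => c + 1) i = i + l.length := by
  induction l generalizing i with
  | nil => simp
  | cons a t ih => simp only [List.foldl_cons, ih, List.length_cons]; push_cast; ring

theorem pv_foldl_flat {α β γ : Type} (h : α → List β) (step : γ → β → γ) (l : List α) (init : γ) :
    l.foldl (fun s x => (h x).foldl step s) init = (l.flatMap h).foldl step init := by
  induction l generalizing init with
  | nil => rfl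
  | cons a t ih => simp [List.foldl_append, ih]

theorem pv_filter_flatMap {α β : Type} (l : List α) (f : α → List β) (p : β → Bool) :
    (l.flatMap f).filter p = l.flatMap (fun a => (f a).filter p) := by
  induction l with
  | nil => rfl
  | cons a t ih => simp [List.filter_append, ih]

theorem pv_filter_map {α β : Type} (l : List α) (f : α → β) (p : β → Bool) :
    (l.map f).filter p = (l.filter (fun a => p (f a))).map f := by
  induction l with
  | nil => rfl
  | cons a t ih => by_cases h : p (f a) <;> simp [h, ih]

-- board/grid notions used only by the proofs

def pvInb (m n : Int) (p : Int × Int) : Prop := 0 ≤ p.1 ∧ p.1 < m ∧ 0 ≤ p.2 ∧ p.2 < n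

def pvCell (g : List (List Bool)) (p : Int × Int) : Bool :=
  PySem.List.pyGetD (PySem.List.pyGetD g p.1 []) p.2 false

def pvShape (g : List (List Bool)) (M N : Nat) : Prop :=
  g.length = M ∧ ∀ row ∈ g, row.length = N

def pvCells (p : Int × Int) : List (Int × Int) := [p, (p.1 + 1, p.2), (p.1, p.2 + 1), (p.1 + 1, p.2 + 1)]

-- pvMark in set/getElem normal form
theorem pvMark_eq {m n : Int} (g : List (List Bool)) (p : Int × Int)
    (hp : pvInb m n p) (hs : pvShape g m.toNat n.toNat) :
    ∃ hR : p.1.toNat < g.length,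
      pvMark g p.1 p.2 = g.set p.1.toNat ((g[p.1.toNat]).set p.2.toNat true) := by
  obtain ⟨h1, h2, h3, h4⟩ := hp
  obtain ⟨hgl, hrow⟩ := hs
  have hR : p.1.toNat < g.length := by omega
  refine ⟨hR, ?_⟩
  rw [pvMark, PySem.List.pyGetD_eq_getElem g [] h1 (by omega),
      PySem.List.pySetD_of_nonneg _ _ h3, PySem.List.pySetD_of_nonneg _ _ h1]

theorem pvCell_eq {m n : Int} (g : List (List Bool)) (q : Int × Int)
    (hq : pvInb m n q) (hs : pvShape g m.toNat n.toNat) :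
    ∃ (h1 : q.1.toNat < g.length) (h2 : q.2.toNat < (g[q.1.toNat]).length),
      pvCell g q = g[q.1.toNat][q.2.toNat] := by
  obtain ⟨q1, q2, q3, q4⟩ := hq
  obtain ⟨hgl, hrow⟩ := hs
  have h1 : q.1.toNat < g.length := by omega
  have hrl : (g[q.1.toNat]).length = n.toNat := hrow _ (List.getElem_mem h1)
  have h2 : q.2.toNat < (g[q.1.toNat]).length := by omega
  refine ⟨h1, h2, ?_⟩
  rw [pvCell, PySem.List.pyGetD_eq_getElem g [] q1 (by omega),
      PySem.List.pyGetD_eq_getElem _ false q3 (by rw [hrl]; omega)]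

theorem pv_mark_shape {m n : Int} (g : List (List Bool)) (p : Int × Int)
    (hp : pvInb m n p) (hs : pvShape g m.toNat n.toNat) :
    pvShape (pvMark g p.1 p.2) m.toNat n.toNat := by
  obtain ⟨hR, heq⟩ := pvMark_eq g p hp hs
  obtain ⟨hgl, hrow⟩ := hs
  rw [heq]
  refine ⟨by simpa using hgl, ?_⟩
  intro row hr
  rcases List.mem_or_eq_of_mem_set hr with h | h
  · exact hrow row h
  · rw [h, List.length_set]; exact hrow _ (List.getElem_mem hR)

theorem pv_main_step_cell {m n : Int} (g : List (List Bool)) (p q : Int × Int)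
    (hp : pvInb m n p) (hq : pvInb m n q) (hs : pvShape g m.toNat n.toNat) :
    pvCell (pvMark g p.1 p.2) q = (if q = p then true else pvCell g q) := by
  obtain ⟨hR, heq⟩ := pvMark_eq g p hp hs
  obtain ⟨hq1, hq2, hcq⟩ := pvCell_eq g q hq hs
  obtain ⟨hq1', hq2', hcq'⟩ := pvCell_eq (pvMark g p.1 p.2) q hq (pv_mark_shape g p hp hs)
  obtain ⟨a1, a2, a3, a4⟩ := hp
  obtain ⟨b1, b2, b3, b4⟩ := hq
  rw [hcq, hcq']
  simp only [heq, List.getElem_set]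
  by_cases h1 : q.1 = p.1
  · have h1n : p.1.toNat = q.1.toNat := by omega
    by_cases h2 : q.2 = p.2
    · have h2n : p.2.toNat = q.2.toNat := by omega
      have : q = p := Prod.ext h1 h2
      simp [h1n, h2n, this]
    · have h2n : ¬ (p.2.toNat = q.2.toNat) := by omega
      have : ¬ (q = p) := by intro h; exact h2 (congrArg Prod.snd h)
      simp [h1n, h2n, this]
  · have h1n : ¬ (p.1.toNat = q.1.toNat) := by omega
    have : ¬ (q = p) := by intro h; exact h1 (congrArg Prod.fst h)
    simp [h1n, this]

-- marking a list of cells in the grid, read back cell-wise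
theorem pv_cell_fold {m n : Int} (L : List (Int × Int)) :
    ∀ (g : List (List Bool)) (q : Int × Int),
    (∀ p ∈ L, pvInb m n p) → pvShape g m.toNat n.toNat → pvInb m n q →
    pvCell (L.foldl (fun g p => pvMark g p.1 p.2) g) q = (decide (q ∈ L) || pvCell g q) := by
  induction L with
  | nil => intro g q _ _ _; simp
  | cons p t ih =>
    intro g q hL hs hq
    have hp := hL p List.mem_cons_self
    simp only [List.foldl_cons]
    rw [ih _ q (fun x hx => hL x (List.mem_cons_of_mem _ hx)) (pv_mark_shape g p hp hs) hq]
    rw [pv_main_step_cell g p q hp hq hs]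
    by_cases hqp : q = p
    · simp [hqp]
    · simp [hqp, List.mem_cons]

-- q is covered iff q is a cell of some in-range matching window
theorem pv_cov_iff (board : List (List String)) (m n : Int) (q1 q2 : Int) :
    pvAltCovered board m n q1 q2 = true ↔
      (∃ p : Int × Int, (0 ≤ p.1 ∧ p.1 < m - 1 ∧ 0 ≤ p.2 ∧ p.2 < n - 1)
        ∧ pvAltMatches board p.1 p.2 = true ∧ (q1, q2) ∈ pvCells p) := by
  simp only [pvAltCovered, List.any_cons, List.any_nil, Bool.or_false, Bool.or_eq_true,
    Bool.and_eq_true, decide_eq_true_eq]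
  constructor
  · rintro ((⟨hr, hm⟩ | ⟨hr, hm⟩) | (⟨hr, hm⟩ | ⟨hr, hm⟩))
    · exact ⟨(q1 - 1, q2 - 1), hr, hm, by simp [pvCells, Prod.ext_iff]⟩
    · exact ⟨(q1 - 1, q2), hr, hm, by simp [pvCells, Prod.ext_iff]⟩
    · exact ⟨(q1, q2 - 1), hr, hm, by simp [pvCells, Prod.ext_iff]⟩
    · exact ⟨(q1, q2), hr, hm, by simp [pvCells]⟩
  · rintro ⟨⟨pr, pc⟩, hw, hm, hc⟩
    obtain ⟨hw1, hw2, hw3, hw4⟩ := hw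
    simp only [pvCells, List.mem_cons, List.not_mem_nil, or_false, Prod.ext_iff] at hc
    rcases hc with ⟨h1, h2⟩ | ⟨h1, h2⟩ | ⟨h1, h2⟩ | ⟨h1, h2⟩
    · right; right
      subst h1; subst h2
      exact ⟨⟨hw1, hw2, hw3, hw4⟩, hm⟩
    · left; right
      subst h1; subst h2
      rw [show pr + 1 - 1 = pr from by ring]
      exact ⟨⟨hw1, hw2, hw3, hw4⟩, hm⟩
    · right; left
      subst h1; subst h2
      rw [show pc + 1 - 1 = pc from by ring]
      exact ⟨⟨hw1, hw2, hw3, hw4⟩, hm⟩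
    · left; left
      subst h1; subst h2
      rw [show pr + 1 - 1 = pr from by ring, show pc + 1 - 1 = pc from by ring]
      exact ⟨⟨hw1, hw2, hw3, hw4⟩, hm⟩

theorem remove_blocks_main : ∀ (board : List (List String)) (m : Int) (n : Int),
    remove_blocks board m n = remove_blocks_alt board m n := by
  intro board m n
  simp only [remove_blocks, remove_blocks_alt]
  set check0 : List (List Bool) := (PySem.List.pyRange 0 m 1).map
    (fun _ => (PySem.List.pyRange 0 n 1).map (fun _ => (false : Bool))) with hc0
  set W : List (Int × Int) := (PySem.List.pyRange 0 (m-1) 1).flatMap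
    (fun r => (PySem.List.pyRange 0 (n-1) 1).map (fun c => (r, c))) with hW
  set L : List (Int × Int) := (W.filter (fun p => pvAltMatches board p.1 p.2)).flatMap pvCells
    with hLdef
  -- A's marking phase builds `L.foldl pvMark check0`
  have hcanonA : ∀ (acc : List (List Bool)), ∀ x ∈ W,
      (fun (check : List (List Bool)) (p : Int × Int) =>
        if PySem.List.pyGetD (PySem.List.pyGetD board x.1 []) x.2 "" = "" then check
        else if PySem.List.pyGetD (PySem.List.pyGetD board (x.1+1) []) x.2 "" = PySem.List.pyGetD (PySem.List.pyGetD board x.1 []) x.2 ""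
                ∧ PySem.List.pyGetD (PySem.List.pyGetD board x.1 []) (x.2+1) "" = PySem.List.pyGetD (PySem.List.pyGetD board x.1 []) x.2 ""
                ∧ PySem.List.pyGetD (PySem.List.pyGetD board (x.1+1) []) (x.2+1) "" = PySem.List.pyGetD (PySem.List.pyGetD board x.1 []) x.2 "" then
          pvMark (pvMark (pvMark (pvMark check x.1 x.2) (x.1+1) x.2) x.1 (x.2+1)) (x.1+1) (x.2+1)
        else check) acc x
      = (fun (s : List (List Bool)) (p : Int × Int) =>
          if pvAltMatches board x.1 x.2 then (pvCells x).foldl (fun g q => pvMark g q.1 q.2) s else s) acc x := by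
    intro acc x _
    simp only [pvAltMatches, pvCells, List.foldl_cons, List.foldl_nil, decide_eq_true_eq, ne_eq]
    by_cases h0 : PySem.List.pyGetD (PySem.List.pyGetD board x.1 []) x.2 "" = ""
    · simp [h0]
    · by_cases h1 : PySem.List.pyGetD (PySem.List.pyGetD board (x.1+1) []) x.2 "" = PySem.List.pyGetD (PySem.List.pyGetD board x.1 []) x.2 ""
          ∧ PySem.List.pyGetD (PySem.List.pyGetD board x.1 []) (x.2+1) "" = PySem.List.pyGetD (PySem.List.pyGetD board x.1 []) x.2 ""
          ∧ PySem.List.pyGetD (PySem.List.pyGetD board (x.1+1) []) (x.2+1) "" = PySem.List.pyGetD (PySem.List.pyGetD board x.1 []) x.2 ""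
      · simp [h0, h1]
      · simp [h0, h1]
  have hbuildA :
      (PySem.List.pyRange 0 (m-1) 1).foldl (fun check r =>
        (PySem.List.pyRange 0 (n-1) 1).foldl (fun check c =>
          if PySem.List.pyGetD (PySem.List.pyGetD board r []) c "" = "" then check
          else if PySem.List.pyGetD (PySem.List.pyGetD board (r+1) []) c "" = PySem.List.pyGetD (PySem.List.pyGetD board r []) c "" ∧ PySem.List.pyGetD (PySem.List.pyGetD board r []) (c+1) "" = PySem.List.pyGetD (PySem.List.pyGetD board r []) c "" ∧ PySem.List.pyGetD (PySem.List.pyGetD board (r+1) []) (c+1) "" = PySem.List.pyGetD (PySem.List.pyGetD board r []) c "" then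
            pvMark (pvMark (pvMark (pvMark check r c) (r+1) c) r (c+1)) (r+1) (c+1)
          else check) check) check0
      = L.foldl (fun g q => pvMark g q.1 q.2) check0 := by
    rw [pv_foldl_nest, ← hW]
    rw [PySem.List.foldl_congr_mem W _ _ check0 hcanonA]
    rw [pv_foldl_if_filter, pv_foldl_flat, ← hLdef]
  rw [hbuildA]
  -- bounds and shape bookkeeping
  have hL : ∀ q ∈ L, pvInb m n q := by
    intro q hq
    rw [hLdef] at hq
    rw [List.mem_flatMap] at hq
    obtain ⟨p, hpW, hqc⟩ := hq
    rw [List.mem_filter] at hpW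
    have hpW' := hpW.1
    rw [hW, List.mem_flatMap] at hpW'
    obtain ⟨r, hr, hpm⟩ := hpW'
    rw [List.mem_map] at hpm
    obtain ⟨c, hc, hpc⟩ := hpm
    rw [PySem.List.mem_pyRange_one] at hr hc
    subst hpc
    simp only [pvCells, List.mem_cons, List.not_mem_nil, or_false] at hqc
    rcases hqc with h | h | h | h <;> subst h <;>
      exact ⟨by simp; omega, by simp; omega, by simp; omega, by simp; omega⟩
  have hshape0 : pvShape check0 m.toNat n.toNat := by
    constructor
    · simp [hc0, PySem.List.length_pyRange_one]
    · intro row hr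
      rw [hc0, List.mem_map] at hr
      obtain ⟨_, _, hrow⟩ := hr
      rw [← hrow]
      simp [PySem.List.length_pyRange_one]
  have hcell0 : ∀ q, pvInb m n q → pvCell check0 q = false := by
    intro q hq
    obtain ⟨h1, h2, hcp⟩ := pvCell_eq _ q hq hshape0
    rw [hcp]
    simp [hc0]
  -- A's counting loop becomes a count of covered cells
  rw [pv_foldl_nest]
  have hcells : ∀ (cnt : Int), ∀ q ∈ (PySem.List.pyRange 0 m 1).flatMap
      (fun r => (PySem.List.pyRange 0 n 1).map (fun c => (r, c))),
      (fun (cnt : Int) (q : Int × Int) =>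
        if PySem.List.pyGetD (PySem.List.pyGetD (L.foldl (fun g p => pvMark g p.1 p.2) check0) q.1 []) q.2 false then cnt + 1 else cnt) cnt q
      = (fun (cnt : Int) (q : Int × Int) =>
          if pvAltCovered board m n q.1 q.2 then cnt + 1 else cnt) cnt q := by
    intro cnt q hqW
    have hq : pvInb m n q := by
      rw [List.mem_flatMap] at hqW
      obtain ⟨r, hr, hqm⟩ := hqW
      rw [List.mem_map] at hqm
      obtain ⟨c, hc, hqc⟩ := hqm
      rw [PySem.List.mem_pyRange_one] at hr hc
      subst hqc
      exact ⟨by simp; omega, by simp; omega, by simp; omega, by simp; omega⟩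
    have h1 : pvCell (L.foldl (fun g p => pvMark g p.1 p.2) check0) q = decide (q ∈ L) := by
      rw [pv_cell_fold L check0 q hL hshape0 hq, hcell0 q hq, Bool.or_false]
    have h2 : pvAltCovered board m n q.1 q.2 = decide (q ∈ L) := by
      have hiff : pvAltCovered board m n q.1 q.2 = true ↔ q ∈ L := by
        rw [pv_cov_iff board m n q.1 q.2, hLdef]
        simp only [List.mem_flatMap, List.mem_filter, hW, List.mem_map,
          PySem.List.mem_pyRange_one]
        constructor
        · rintro ⟨p, hw, hm, hc⟩
          exact ⟨p, ⟨⟨p.1, ⟨by omega, by omega⟩, p.2, ⟨by omega, by omega⟩, rfl⟩, hm⟩, hc⟩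
        · rintro ⟨p, ⟨⟨r, hr, c, hc, hrc⟩, hm⟩, hcell⟩
          subst hrc
          exact ⟨(r, c), ⟨by simp; omega, by simp; omega, by simp; omega, by simp; omega⟩, hm, hcell⟩
      cases hcov : pvAltCovered board m n q.1 q.2
      · simp only [hcov] at hiff
        simp [(by simpa using hiff : ¬ q ∈ L)]
      · simp [hiff.mp hcov]
    show (if pvCell (L.foldl (fun g p => pvMark g p.1 p.2) check0) q then cnt + 1 else cnt)
        = (if pvAltCovered board m n q.1 q.2 then cnt + 1 else cnt)
    rw [h1, h2]
  rw [PySem.List.foldl_congr_mem _ _ _ 0 hcells]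
  rw [pv_foldl_if_filter, pv_foldl_len]
  -- B's cleared list is exactly the filtered cell list
  rw [pv_filter_flatMap]
  simp only [pv_filter_map]
  simp

-- ===== VERDICT (by name: the statement is the Claim_ definition above) =====
theorem remove_blocks_spec : Claim_equal_remove_blocks := by
  intro board m n _ _
  unfold Spec_remove_blocks
  exact remove_blocks_main board m n
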